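-- pv_equiv track=rewrite | github.com/spoonfloor/baby-eats | scripts/prune_dead_list_css.py | _prelude_rewritten
-- ===== SOURCE A (Python) =====
-- DROP_SUBSTR: tuple[str, ...] = (
--     "data-force-web-mode='on'",
--     "data-platform='planner'",
--     "body.shopping-page",
--     "body.stores-page",
--     "body.tags-page",
--     "body.units-page",
--     "body.sizes-page",
--     "body.shopping-list-page",
--     "body.shopping-editor-page",
--     "body.store-editor-page",
--     "body.tag-editor-page",
--     "body.unit-editor-page",
--     "body.size-editor-page",
--     "body.has-top-filter-chip-rail.shopping-page",
--     "body.has-top-filter-chip-rail.stores-page",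
--     "body.has-top-filter-chip-rail.tags-page",
--     "body.has-top-filter-chip-rail.sizes-page",
--     "body.has-top-filter-chip-rail.units-page",
--     "body.has-top-filter-chip-rail.shopping-list-page",
--     ".bottom-nav",
--     "bottomNavEditorToggle",
--     "bottom-nav-",
-- )
--
-- def _split_top_level_comma(prelude: str) -> list[str]:
--     parts: list[str] = []
--     buf: list[str] = []
--     depth = 0
--     for c in prelude:
--         if c == "(":
--             depth += 1
--         elif c == ")":
--             depth = max(0, depth - 1)
--         elif c == "," and depth == 0:
--             p = "".join(buf).strip()
--             if p:
--                 parts.append(p)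
--             buf = []
--             continue
--         buf.append(c)
--     last = "".join(buf).strip()
--     if last:
--         parts.append(last)
--     return parts if parts else [prelude.strip()] if prelude.strip() else []
--
-- def _prelude_part_dropped(part: str) -> bool:
--     p = " ".join(part.split())
--     return any(sub in p for sub in DROP_SUBSTR)
--
-- def _prelude_rewritten(prelude: str) -> str | None:
--     """
--     None = drop entire rule. Otherwise new prelude; may equal the original
--     to preserve exact formatting.
--     """
--     parts = _split_top_level_comma(prelude)
--     kept = [p for p in parts if not _prelude_part_dropped(p)]
--     if not kept:
--         return None
--     if len(kept) == len(parts):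
--         return prelude
--     return ",\n".join(kept)
-- ===== SOURCE B (Python) =====
-- DROP_SUBSTR: tuple[str, ...] = (
--     "data-force-web-mode='on'",
--     "data-platform='planner'",
--     "body.shopping-page",
--     "body.stores-page",
--     "body.tags-page",
--     "body.units-page",
--     "body.sizes-page",
--     "body.shopping-list-page",
--     "body.shopping-editor-page",
--     "body.store-editor-page",
--     "body.tag-editor-page",
--     "body.unit-editor-page",
--     "body.size-editor-page",
--     "body.has-top-filter-chip-rail.shopping-page",
--     "body.has-top-filter-chip-rail.stores-page",
--     "body.has-top-filter-chip-rail.tags-page",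
--     "body.has-top-filter-chip-rail.sizes-page",
--     "body.has-top-filter-chip-rail.units-page",
--     "body.has-top-filter-chip-rail.shopping-list-page",
--     ".bottom-nav",
--     "bottomNavEditorToggle",
--     "bottom-nav-",
-- )
--
--
-- def _prelude_rewritten(prelude: str) -> str | None:
--     # Fragment-based splitter: split on every comma first, then re-join the
--     # fragments that sit inside parentheses by tracking a running depth.
--     parts: list[str] = []
--     cur: str | None = None
--     depth = 0
--     for frag in prelude.split(','):
--         cur = frag if cur is None else cur + ',' + frag
--         for ch in frag:
--             if ch == '(':
--                 depth += 1
--             elif ch == ')':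
--                 depth = max(0, depth - 1)
--         if depth == 0:
--             p = cur.strip()
--             if p:
--                 parts.append(p)
--             cur = None
--     if cur is not None:
--         p = cur.strip()
--         if p:
--             parts.append(p)
--     if not parts:
--         s = prelude.strip()
--         parts = [s] if s else []
--     kept = [p for p in parts
--             if not any(sub in ' '.join(p.split()) for sub in DROP_SUBSTR)]
--     if not kept:
--         return None
--     if len(kept) == len(parts):
--         return prelude
--     return ',\n'.join(kept)
-- ===== Notes on version B (the rewrite author's own statement) =====
-- stated objective: alternative
-- what changed: Replaces A's char-by-char buffer/depth splitter with a fragment-based one: split the prelude on every comma first, then re-join fragments that lie inside parentheses by carrying a running clamped depth across fragments; the filter/fallback/return logic is unchanged.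
import Mathlib
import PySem

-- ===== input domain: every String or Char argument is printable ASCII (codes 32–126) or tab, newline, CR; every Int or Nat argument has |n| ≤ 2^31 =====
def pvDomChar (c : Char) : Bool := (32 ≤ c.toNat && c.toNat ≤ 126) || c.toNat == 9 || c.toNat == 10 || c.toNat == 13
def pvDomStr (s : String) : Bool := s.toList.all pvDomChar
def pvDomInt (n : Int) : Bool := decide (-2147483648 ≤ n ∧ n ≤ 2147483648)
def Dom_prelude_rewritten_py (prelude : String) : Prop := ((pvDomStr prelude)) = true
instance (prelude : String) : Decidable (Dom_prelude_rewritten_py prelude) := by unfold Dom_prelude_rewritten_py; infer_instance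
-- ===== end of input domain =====

-- B re-splits the prelude fragment-wise (split on every comma, re-joining fragments inside
-- parentheses via a running depth) instead of A's char-by-char buffer loop; objective: alternative decomposition, same cost.

-- shared constant and helpers (identical code in both Python sources)
def pvDropSubstr : List (List Char) :=
  [ "data-force-web-mode='on'".toList,
    "data-platform='planner'".toList,
    "body.shopping-page".toList,
    "body.stores-page".toList,
    "body.tags-page".toList,
    "body.units-page".toList,
    "body.sizes-page".toList,
    "body.shopping-list-page".toList,
    "body.shopping-editor-page".toList,
    "body.store-editor-page".toList,
    "body.tag-editor-page".toList,
    "body.unit-editor-page".toList,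
    "body.size-editor-page".toList,
    "body.has-top-filter-chip-rail.shopping-page".toList,
    "body.has-top-filter-chip-rail.stores-page".toList,
    "body.has-top-filter-chip-rail.tags-page".toList,
    "body.has-top-filter-chip-rail.sizes-page".toList,
    "body.has-top-filter-chip-rail.units-page".toList,
    "body.has-top-filter-chip-rail.shopping-list-page".toList,
    ".bottom-nav".toList,
    "bottomNavEditorToggle".toList,
    "bottom-nav-".toList ]

-- _prelude_part_dropped: any(sub in ' '.join(part.split()) for sub in DROP_SUBSTR)
def pvPartDropped (p : List Char) : Bool :=
  pvDropSubstr.any (fun sub =>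
    PySem.Chars.isIn sub (PySem.Chars.join [' '] (PySem.Chars.split₀ p)))

-- "if p: parts.append(p)"
def pvPushIf (parts : List (List Char)) (p : List Char) : List (List Char) :=
  if p = [] then parts else parts ++ [p]

-- ===== PORT A =====
-- one iteration of A's char loop; state = (parts, buf, depth); Nat's `- 1` is Python's max(0, depth-1)
def pvStepA (st : List (List Char) × List Char × Nat) (c : Char) :
    List (List Char) × List Char × Nat :=
  if c = '(' then (st.1, st.2.1 ++ [c], st.2.2 + 1)
  else if c = ')' then (st.1, st.2.1 ++ [c], st.2.2 - 1)
  else if c = ',' ∧ st.2.2 = 0 then (pvPushIf st.1 (PySem.Chars.strip st.2.1), [], st.2.2)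
  else (st.1, st.2.1 ++ [c], st.2.2)

-- _split_top_level_comma
def pvSplitTopA (cs : List Char) : List (List Char) :=
  let st := cs.foldl pvStepA ([], [], 0)
  let parts := pvPushIf st.1 (PySem.Chars.strip st.2.1)
  if parts ≠ [] then parts
  else if PySem.Chars.strip cs ≠ [] then [PySem.Chars.strip cs] else []

def prelude_rewritten_py (prelude : String) : Option String :=
  let parts := pvSplitTopA prelude.toList
  let kept := parts.filter (fun p => !pvPartDropped p)
  if kept = [] then none
  else if kept.length = parts.length then some prelude
  else some (String.ofList (PySem.Chars.join [',', '\n'] kept))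

-- ===== PORT B =====
-- prelude.split(',') for the one-char separator, ported by hand as the obvious structural
-- recursion (exact: ''.split(',') = [''], empty pieces kept)
def pvSplitComma : List Char → List (List Char)
  | [] => [[]]
  | c :: cs =>
    match pvSplitComma cs with
    | [] => [[]]   -- unreachable: pvSplitComma never returns []
    | f :: rest => if c = ',' then [] :: f :: rest else (c :: f) :: rest

-- the inner `for ch in frag` depth loop
def pvScanDepth (d : Nat) (frag : List Char) : Nat :=
  frag.foldl (fun d c => if c = '(' then d + 1 else if c = ')' then d - 1 else d) d

-- one iteration of B's fragment loop; state = (parts, cur, depth)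
def pvStepB (st : List (List Char) × Option (List Char) × Nat) (frag : List Char) :
    List (List Char) × Option (List Char) × Nat :=
  let cur := match st.2.1 with | none => frag | some c => c ++ ',' :: frag
  let d := pvScanDepth st.2.2 frag
  if d = 0 then (pvPushIf st.1 (PySem.Chars.strip cur), none, 0)
  else (st.1, some cur, d)

def pvSplitTopB (cs : List Char) : List (List Char) :=
  let st := (pvSplitComma cs).foldl pvStepB ([], none, 0)
  let parts := match st.2.1 with
    | none => st.1
    | some c => pvPushIf st.1 (PySem.Chars.strip c)
  if parts ≠ [] then parts
  else if PySem.Chars.strip cs ≠ [] then [PySem.Chars.strip cs] else []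

def prelude_rewritten_py_alt (prelude : String) : Option String :=
  let parts := pvSplitTopB prelude.toList
  let kept := parts.filter (fun p => !pvPartDropped p)
  if kept = [] then none
  else if kept.length = parts.length then some prelude
  else some (String.ofList (PySem.Chars.join [',', '\n'] kept))

-- ===== PRECONDITION & SPEC =====
def Spec_prelude_rewritten_py (prelude : String) (out : Option String) : Prop := out = prelude_rewritten_py_alt prelude
instance (prelude : String) (out : Option String) : Decidable (Spec_prelude_rewritten_py prelude out) := by unfold Spec_prelude_rewritten_py; infer_instance

-- ===== CLAIM (what is proved, stated in full; the proofs are below) =====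
def Claim_equal_prelude_rewritten_py : Prop := ∀ (prelude : String), Dom_prelude_rewritten_py prelude → Spec_prelude_rewritten_py prelude (prelude_rewritten_py prelude)

-- ===== LEMMAS AND PROOFS =====

-- the coupling invariant between A's buffer and B's pending fragment
def pvInv (buf : List Char) (cur : Option (List Char)) (d : Nat) : Prop :=
  match cur with
  | none => d = 0 ∧ buf = []
  | some c => d ≠ 0 ∧ buf = c ++ [',']

-- glue: undo the comma split (List.intercalate [','], in a shape easy to recurse on)
def pvGlue : List (List Char) → List Char
  | [] => []
  | [f] => f
  | f :: g :: rest => f ++ ',' :: pvGlue (g :: rest)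

lemma pvSplitComma_ne_nil (cs : List Char) : pvSplitComma cs ≠ [] := by
  cases cs with
  | nil => simp [pvSplitComma]
  | cons c cs =>
    simp only [pvSplitComma]
    cases h : pvSplitComma cs with
    | nil => simp
    | cons f rest => by_cases hc : c = ',' <;> simp [hc]

lemma pvGlue_splitComma (cs : List Char) : pvGlue (pvSplitComma cs) = cs := by
  induction cs with
  | nil => rfl
  | cons c cs ih =>
    simp only [pvSplitComma]
    cases h : pvSplitComma cs with
    | nil => exact absurd h (pvSplitComma_ne_nil cs)
    | cons f rest =>
      rw [h] at ih
      by_cases hc : c = ','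
      · simp [hc, pvGlue, ih]
      · simp only [if_neg hc]
        cases rest with
        | nil => simp [pvGlue] at ih ⊢; simp [ih]
        | cons g r => simpa [pvGlue] using congrArg (c :: ·) ih

lemma pvSplitComma_comma_free (cs : List Char) : ∀ f ∈ pvSplitComma cs, ',' ∉ f := by
  induction cs with
  | nil => simp [pvSplitComma]
  | cons c cs ih =>
    intro g hg
    cases h : pvSplitComma cs with
    | nil => exact absurd h (pvSplitComma_ne_nil cs)
    | cons f rest =>
      rw [h] at ih
      simp only [pvSplitComma, h] at hg
      by_cases hc : c = ','
      · rw [if_pos hc] at hg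
        rcases List.mem_cons.mp hg with rfl | hg'
        · simp
        · exact ih g hg'
      · rw [if_neg hc] at hg
        rcases List.mem_cons.mp hg with rfl | hg'
        · intro hmem
          rcases List.mem_cons.mp hmem with h' | h'
          · exact hc h'.symm
          · exact ih f (by simp) h'
        · exact ih g (by simp [hg'])

-- A's char loop over a comma-free block just appends it and updates the depth
lemma pvFoldA_comma_free (f : List Char) (hf : ',' ∉ f) :
    ∀ (parts : List (List Char)) (buf : List Char) (d : Nat),
    List.foldl pvStepA (parts, buf, d) f = (parts, buf ++ f, pvScanDepth d f) := by
  induction f with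
  | nil => intro parts buf d; simp [pvScanDepth]
  | cons c cs ih =>
    intro parts buf d
    have hc : c ≠ ',' := fun h => hf (by simp [h])
    have hcs : ',' ∉ cs := fun h => hf (by simp [h])
    by_cases h1 : c = '('
    · simp [List.foldl_cons, pvStepA, h1, ih hcs, pvScanDepth]
    · by_cases h2 : c = ')'
      · simp [List.foldl_cons, pvStepA, h2, ih hcs, pvScanDepth]
      · simp [List.foldl_cons, pvStepA, h1, h2, hc, ih hcs, pvScanDepth]

def pvFinA (st : List (List Char) × List Char × Nat) : List (List Char) :=
  pvPushIf st.1 (PySem.Chars.strip st.2.1)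

def pvFinB (st : List (List Char) × Option (List Char) × Nat) : List (List Char) :=
  match st.2.1 with
  | none => st.1
  | some c => pvPushIf st.1 (PySem.Chars.strip c)

lemma pvMain : ∀ (rest : List (List Char)) (f : List Char)
    (parts : List (List Char)) (buf : List Char) (d : Nat) (cur : Option (List Char)),
    pvInv buf cur d → ',' ∉ f → (∀ g ∈ rest, ',' ∉ g) →
    pvFinA (List.foldl pvStepA (parts, buf, d) (pvGlue (f :: rest))) =
    pvFinB (List.foldl pvStepB (parts, cur, d) (f :: rest)) := by
  intro rest
  induction rest with
  | nil =>
    intro f parts buf d cur hinv hf _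
    rw [pvGlue, pvFoldA_comma_free f hf, List.foldl_cons, List.foldl_nil]
    cases cur with
    | none =>
      simp only [pvInv] at hinv
      obtain ⟨hd0, hb⟩ := hinv; subst hb
      simp only [pvStepB]
      by_cases h0 : pvScanDepth d f = 0
      · rw [if_pos h0]; simp [pvFinA, pvFinB]
      · rw [if_neg h0]; simp [pvFinA, pvFinB]
    | some c =>
      simp only [pvInv] at hinv
      obtain ⟨hd0, hb⟩ := hinv; subst hb
      simp only [pvStepB]
      by_cases h0 : pvScanDepth d f = 0
      · rw [if_pos h0]; simp [pvFinA, pvFinB]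
      · rw [if_neg h0]; simp [pvFinA, pvFinB]
  | cons g rest ih =>
    intro f parts buf d cur hinv hf hrest
    have hg : ',' ∉ g := hrest g (by simp)
    have hrest' : ∀ x ∈ rest, ',' ∉ x := fun x hx => hrest x (by simp [hx])
    rw [pvGlue, List.foldl_append, pvFoldA_comma_free f hf, List.foldl_cons, List.foldl_cons]
    cases cur with
    | none =>
      simp only [pvInv] at hinv
      obtain ⟨hd0, hb⟩ := hinv; subst hb
      simp only [pvStepB]
      by_cases h0 : pvScanDepth d f = 0
      · rw [if_pos h0]
        have hA : pvStepA (parts, [] ++ f, pvScanDepth d f) ',' =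
            (pvPushIf parts (PySem.Chars.strip f), [], pvScanDepth d f) := by
          simp [pvStepA, h0]
        rw [hA, h0]
        simpa using ih g (pvPushIf parts (PySem.Chars.strip f)) [] 0 none
          (by simp [pvInv]) hg hrest'
      · rw [if_neg h0]
        have hA : pvStepA (parts, [] ++ f, pvScanDepth d f) ',' =
            (parts, ([] ++ f) ++ [','], pvScanDepth d f) := by
          simp [pvStepA, h0]
        rw [hA]
        simpa using ih g parts (f ++ [',']) (pvScanDepth d f) (some f)
          (by simp [pvInv, h0]) hg hrest'
    | some c =>
      simp only [pvInv] at hinv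
      obtain ⟨hd0, hb⟩ := hinv; subst hb
      simp only [pvStepB]
      by_cases h0 : pvScanDepth d f = 0
      · rw [if_pos h0]
        have hA : pvStepA (parts, (c ++ [',']) ++ f, pvScanDepth d f) ',' =
            (pvPushIf parts (PySem.Chars.strip ((c ++ [',']) ++ f)), [], pvScanDepth d f) := by
          simp [pvStepA, h0]
        rw [hA, h0]
        have := ih g (pvPushIf parts (PySem.Chars.strip ((c ++ [',']) ++ f))) [] 0 none
          (by simp [pvInv]) hg hrest'
        simpa only [List.append_assoc, List.singleton_append] using this
      · rw [if_neg h0]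
        have hA : pvStepA (parts, (c ++ [',']) ++ f, pvScanDepth d f) ',' =
            (parts, ((c ++ [',']) ++ f) ++ [','], pvScanDepth d f) := by
          simp [pvStepA, h0]
        rw [hA]
        have := ih g parts (((c ++ [',']) ++ f) ++ [',']) (pvScanDepth d f)
          (some ((c ++ [',']) ++ f)) (by simp [pvInv, h0]) hg hrest'
        simpa only [List.append_assoc, List.singleton_append] using this

lemma pvSplitTop_eq (cs : List Char) : pvSplitTopA cs = pvSplitTopB cs := by
  have h1 : pvFinA (List.foldl pvStepA ([], [], 0) cs) =
      pvFinB (List.foldl pvStepB ([], none, 0) (pvSplitComma cs)) := by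
    cases h : pvSplitComma cs with
    | nil => exact absurd h (pvSplitComma_ne_nil cs)
    | cons f rest =>
      have hcf := pvSplitComma_comma_free cs
      rw [h] at hcf
      conv_lhs => rw [← pvGlue_splitComma cs, h]
      exact pvMain rest f [] [] 0 none (by simp [pvInv]) (hcf f (by simp))
        (fun g hg => hcf g (by simp [hg]))
  simp only [pvSplitTopA, pvSplitTopB, pvFinA, pvFinB] at h1 ⊢
  rw [h1]

-- ===== VERDICT (by name: the statement is the Claim_ definition above) =====
theorem prelude_rewritten_py_spec : Claim_equal_prelude_rewritten_py := by
  intro prelude _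
  unfold Spec_prelude_rewritten_py
  simp only [prelude_rewritten_py, prelude_rewritten_py_alt, pvSplitTop_eq]
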